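-- pv_equiv track=rewrite | github.com/SilentGene/MethanoHunt | methanohunt/cli.py | parse_greedy_args
-- ===== SOURCE A (Python) =====
-- def parse_greedy_args(args, flags):
--     """
--     Greedily collect arguments following specific flags until the next flag.
--     Handles multiple occurrences by concatenating lists?
--     Or assuming single occurrence for now as per simple glob expansion.
--     """
--     values = []
--     parsing = False
--     for arg in args:
--         if arg in flags:
--             parsing = True
--             continue
--         if parsing:
--             if arg.startswith('-') and len(arg) > 1:
--                 # Stop if we hit another flag (heuristic: starts with -, not just -)
--                 # But allow negative numbers? For filenames, usually safe.
--                 # Assuming typical flag usage.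
--                 parsing = False
--                 # Don't break, might be another flag we care about later?
--                 # Actually, if we see another flag, we stop parsing FOR THIS flag.
--                 # If we see the SAME flag again?
--                 # Let's simple scan:
--                 # Find flag index, take next args until next flag.
--             else:
--                 values.append(arg)
--
--     # Re-implemented to handle "find flag, take validation"
--     collected = []
--     i = 0
--     while i < len(args):
--         arg = args[i]
--         if arg in flags:
--             i += 1
--             while i < len(args):
--                 val = args[i]
--                 if val.startswith('-') and len(val) > 1:
--                     # Found next flag
--                     break
--                 collected.append(val)
--                 i += 1
--         else:
--             i += 1
--     return collected
-- ===== SOURCE B (Python) =====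
-- def parse_greedy_args(args, flags):
--     collected = []
--     collecting = False
--     for arg in args:
--         if collecting and not (arg.startswith('-') and len(arg) > 1):
--             collected.append(arg)
--         else:
--             collecting = arg in flags
--     return collected
-- ===== Notes on version B (the rewrite author's own statement) =====
-- stated objective: simpler
-- what changed: Drops A's dead first loop and replaces the index-driven nested while-scanner with one flat linear pass keeping a single boolean `collecting` state; B tests flag membership only when not already collecting, while A runs the O(m) `arg in flags` test for every arg in its dead loop and again in the outer scan.
import Mathlib
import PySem

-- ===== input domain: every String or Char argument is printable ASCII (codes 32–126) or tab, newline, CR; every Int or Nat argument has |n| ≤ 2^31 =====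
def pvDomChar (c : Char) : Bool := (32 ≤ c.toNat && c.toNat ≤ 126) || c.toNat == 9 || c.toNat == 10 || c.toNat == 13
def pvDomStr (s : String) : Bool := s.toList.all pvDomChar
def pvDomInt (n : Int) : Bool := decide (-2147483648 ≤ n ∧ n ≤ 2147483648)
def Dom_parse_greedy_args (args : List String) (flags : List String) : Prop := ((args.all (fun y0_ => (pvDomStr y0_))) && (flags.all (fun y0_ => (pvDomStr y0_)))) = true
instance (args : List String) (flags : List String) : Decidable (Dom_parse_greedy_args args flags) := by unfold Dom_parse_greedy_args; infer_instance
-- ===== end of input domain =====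

-- B drops A's dead first loop and replaces the index-driven nested while-scanner with one flat
-- linear pass keeping a single boolean `collecting` state; same result, simpler structure.


-- ===== PORT A =====
-- inner `while`: collect until a "-"-prefixed arg of length > 1; returns (remaining args, collected)
def pvAinner : List String → List String → List String × List String
  | [], collected => ([], collected)
  | val :: rest, collected =>
    if PySem.Str.startswith val "-" && PySem.Str.len val > 1 then (val :: rest, collected)
    else pvAinner rest (collected ++ [val])

theorem pvAinner_len (rest collected : List String) : (pvAinner rest collected).1.length ≤ rest.length := by
  induction rest generalizing collected with
  | nil => simp [pvAinner]
  | cons v rs ih =>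
    simp only [pvAinner]
    split
    · simp
    · exact Nat.le_succ_of_le (ih _)

-- outer `while i < len(args)` loop
def pvAouter (flags : List String) : List String → List String → List String
  | [], collected => collected
  | arg :: rest, collected =>
    if flags.contains arg then
      let p := pvAinner rest collected
      pvAouter flags p.1 p.2
    else pvAouter flags rest collected
termination_by l _ => l.length
decreasing_by
  · exact Nat.lt_succ_of_le (pvAinner_len rest collected)
  · simp

def parse_greedy_args (args : List String) (flags : List String) : List String :=
  -- A's first loop computes `values` and `parsing` but never uses them (dead code); kept for fidelity.
  let _dead := args.foldl (fun (st : List String × Bool) arg =>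
    if flags.contains arg then (st.1, true)
    else if st.2 then
      (if PySem.Str.startswith arg "-" && PySem.Str.len arg > 1 then (st.1, false)
       else (st.1 ++ [arg], st.2))
    else st) ([], false)
  -- second (result-producing) nested while-loop, as structural recursion over the suffix of args
  pvAouter flags args []


-- ===== PORT B =====
def parse_greedy_args_alt (args : List String) (flags : List String) : List String :=
  (args.foldl (fun (st : List String × Bool) arg =>
    if st.2 && !(PySem.Str.startswith arg "-" && PySem.Str.len arg > 1) then (st.1 ++ [arg], st.2)
    else (st.1, flags.contains arg)) ([], false)).1


-- ===== PRECONDITION & SPEC =====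
def Spec_parse_greedy_args (args : List String) (flags : List String) (out : List String) : Prop := out = parse_greedy_args_alt args flags
instance (args : List String) (flags : List String) (out : List String) : Decidable (Spec_parse_greedy_args args flags out) := by unfold Spec_parse_greedy_args; infer_instance

-- ===== CLAIM (what is proved, stated in full; the proofs are below) =====
def Claim_equal_parse_greedy_args : Prop := ∀ (args : List String) (flags : List String), Dom_parse_greedy_args args flags → Spec_parse_greedy_args args flags (parse_greedy_args args flags)

-- ===== LEMMAS AND PROOFS =====

-- B's fold step, named for the proofs
def pvBstep (flags : List String) (st : List String × Bool) (arg : String) : List String × Bool :=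
  if st.2 && !(PySem.Str.startswith arg "-" && PySem.Str.len arg > 1) then (st.1 ++ [arg], st.2)
  else (st.1, flags.contains arg)

theorem pvBalt_eq (args flags : List String) :
    parse_greedy_args_alt args flags = (args.foldl (pvBstep flags) ([], false)).1 := rfl

-- A's outer loop (both in its "scanning" and its "just-entered-collection" state)
-- equals B's fold, for any accumulator.
theorem pvMain (flags : List String) : ∀ (rest collected : List String),
    pvAouter flags rest collected = (rest.foldl (pvBstep flags) (collected, false)).1
    ∧ pvAouter flags (pvAinner rest collected).1 (pvAinner rest collected).2
      = (rest.foldl (pvBstep flags) (collected, true)).1 := by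
  intro rest
  induction rest with
  | nil => intro collected; constructor <;> simp [pvAouter, pvAinner]
  | cons v rs ih =>
    intro collected
    have hstep0 : pvBstep flags (collected, false) v = (collected, flags.contains v) := by
      simp [pvBstep]
    have ha : pvAouter flags (v :: rs) collected
        = ((v :: rs).foldl (pvBstep flags) (collected, false)).1 := by
      rw [pvAouter, List.foldl_cons, hstep0]
      by_cases hc : flags.contains v = true
      · rw [hc]; simp only []; exact (ih collected).2
      · simp only [Bool.not_eq_true] at hc
        rw [hc]; simp only [Bool.false_eq_true, if_false]; exact (ih collected).1
    refine ⟨ha, ?_⟩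
    rw [pvAinner]
    by_cases hs : (PySem.Str.startswith v "-" && PySem.Str.len v > 1) = true
    · simp only [hs, ite_true]
      rw [ha, List.foldl_cons, List.foldl_cons, hstep0]
      have : pvBstep flags (collected, true) v = (collected, flags.contains v) := by
        simp only [pvBstep, Bool.true_and, hs, Bool.not_true, Bool.false_eq_true, if_false]
      rw [this]
    · simp only [Bool.not_eq_true] at hs
      simp only [hs, Bool.false_eq_true, if_false]
      have : pvBstep flags (collected, true) v = (collected ++ [v], true) := by
        simp only [pvBstep, Bool.true_and, hs, Bool.not_false, if_true]
      rw [List.foldl_cons, this]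
      exact (ih (collected ++ [v])).2

-- ===== VERDICT (by name: the statement is the Claim_ definition above) =====
theorem parse_greedy_args_spec : Claim_equal_parse_greedy_args := by
  intro args flags _
  show parse_greedy_args args flags = parse_greedy_args_alt args flags
  rw [pvBalt_eq]
  exact (pvMain flags args []).1
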